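-- pv_equiv track=rewrite | github.com/yri-ai/DealSignals | scripts/prep_layer_02.py | truncate_sections
-- ===== SOURCE A (Python) =====
-- def truncate_sections(
--     sections: dict[str, str],
--     priority: list[str],
--     budget_chars: int,
-- ) -> str:
--     if budget_chars <= 0:
--         return ""
--
--     remaining = budget_chars
--     output: list[str] = []
--     for header in priority:
--         if header not in sections or remaining <= 0:
--             continue
--         section_text = sections[header]
--         if len(section_text) <= remaining:
--             output.append(section_text)
--             remaining -= len(section_text)
--         else:
--             output.append(section_text[:remaining])
--             remaining = 0
--     return "".join(output)
-- ===== SOURCE B (Python) =====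
-- def truncate_sections(
--     sections: dict[str, str],
--     priority: list[str],
--     budget_chars: int,
-- ) -> str:
--     if budget_chars <= 0:
--         return ""
--     return "".join(sections[h] for h in priority if h in sections)[:budget_chars]
-- ===== Notes on version B (the rewrite author's own statement) =====
-- stated objective: simpler
-- what changed: Replaces the greedy per-section budget-tracking loop with concatenating every section in priority order and slicing the result to budget_chars (after the same budget_chars <= 0 guard).
import Mathlib
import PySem

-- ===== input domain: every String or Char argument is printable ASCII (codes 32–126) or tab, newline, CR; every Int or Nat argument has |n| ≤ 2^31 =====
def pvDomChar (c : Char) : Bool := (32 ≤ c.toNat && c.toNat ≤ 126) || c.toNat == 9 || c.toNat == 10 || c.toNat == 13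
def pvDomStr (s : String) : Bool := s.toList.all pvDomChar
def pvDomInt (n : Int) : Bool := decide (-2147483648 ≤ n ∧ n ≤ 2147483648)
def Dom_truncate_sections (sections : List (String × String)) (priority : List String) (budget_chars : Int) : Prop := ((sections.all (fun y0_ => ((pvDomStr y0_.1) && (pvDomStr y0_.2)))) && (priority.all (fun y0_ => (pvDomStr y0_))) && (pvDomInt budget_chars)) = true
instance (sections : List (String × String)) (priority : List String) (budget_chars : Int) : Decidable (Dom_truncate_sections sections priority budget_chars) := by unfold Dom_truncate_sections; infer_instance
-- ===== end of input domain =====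

-- B replaces A's greedy per-section budget-tracking loop by concatenating all
-- prioritized sections and slicing once to budget_chars (objective: simpler).


-- ===== PORT A =====
-- one iteration of A's loop body (state = (remaining, output)); dict lookup = first match
def truncateStepA (sections : List (String × String)) (st : Int × List String) (header : String) : Int × List String :=
  match sections.lookup header with
  | none => st                                  -- 'header not in sections': continue
  | some section_text =>
    if st.1 ≤ 0 then st                         -- 'remaining <= 0': continue
    else if PySem.Str.len section_text ≤ st.1 then
      (st.1 - PySem.Str.len section_text, st.2 ++ [section_text])
    else
      (0, st.2 ++ [PySem.Str.slice section_text none (some st.1)])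

def truncate_sections (sections : List (String × String)) (priority : List String) (budget_chars : Int) : String :=
  if budget_chars ≤ 0 then ""
  else
    let st := priority.foldl (truncateStepA sections) (budget_chars, [])
    PySem.Str.join "" st.2

-- ===== PORT B =====
def truncate_sections_alt (sections : List (String × String)) (priority : List String) (budget_chars : Int) : String :=
  if budget_chars ≤ 0 then ""
  else
    PySem.Str.slice
      (PySem.Str.join "" (priority.filterMap (fun h => sections.lookup h)))
      none (some budget_chars)

-- ===== PRECONDITION & SPEC =====
def Spec_truncate_sections (sections : List (String × String)) (priority : List String) (budget_chars : Int) (out : String) : Prop := out = truncate_sections_alt sections priority budget_chars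
instance (sections : List (String × String)) (priority : List String) (budget_chars : Int) (out : String) : Decidable (Spec_truncate_sections sections priority budget_chars out) := by unfold Spec_truncate_sections; infer_instance

-- ===== CLAIM (what is proved, stated in full; the proofs are below) =====
def Claim_equal_truncate_sections : Prop := ∀ (sections : List (String × String)) (priority : List String) (budget_chars : Int), Dom_truncate_sections sections priority budget_chars → Spec_truncate_sections sections priority budget_chars (truncate_sections sections priority budget_chars)

-- ===== LEMMAS AND PROOFS =====

-- join with empty separator is flatten
lemma chars_join_nil_eq_flatten (l : List (List Char)) : PySem.Chars.join [] l = l.flatten := by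
  induction l with
  | nil => simp [PySem.Chars.join_nil]
  | cons a t ih =>
    cases t with
    | nil => simp [PySem.Chars.join_singleton]
    | cons b t' => simp [PySem.Chars.join_cons_cons, ih]

lemma str_join_nil_toList (l : List String) :
    (PySem.Str.join "" l).toList = (l.map String.toList).flatten := by
  rw [PySem.Str.toList_join]
  exact chars_join_nil_eq_flatten _

-- loop invariant: the joined output of A's fold equals the already-emitted text
-- followed by the first `remaining` characters of the concatenation of the
-- remaining prioritized section texts
lemma truncate_loop_invariant (sections : List (String × String)) (priority : List String)
    (r : Int) (out : List String) (hr : 0 ≤ r) :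
    ((priority.foldl (truncateStepA sections) (r, out)).2.map String.toList).flatten =
      (out.map String.toList).flatten ++
        (((priority.filterMap (fun h => sections.lookup h)).map String.toList).flatten).take r.toNat := by
  induction priority generalizing r out with
  | nil => simp
  | cons h t ih =>
    simp only [List.foldl_cons, List.filterMap_cons, truncateStepA]
    cases hl : sections.lookup h with
    | none => simpa using ih r out hr
    | some text =>
      simp only [List.map_cons, List.flatten_cons]
      by_cases h0 : r ≤ 0
      · have hr0 : r = 0 := le_antisymm h0 hr
        subst hr0
        simp only [if_pos (le_refl (0:Int))]
        simpa using ih 0 out (le_refl _)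
      · simp only [if_neg h0]
        by_cases hlen : PySem.Str.len text ≤ r
        · simp only [if_pos hlen]
          rw [ih (r - PySem.Str.len text) (out ++ [text]) (by omega)]
          have hlen' : text.toList.length ≤ r.toNat := by
            rw [PySem.Str.len_eq] at hlen; omega
          rw [List.take_append, List.take_of_length_le hlen']
          have : (r - PySem.Str.len text).toNat = r.toNat - text.toList.length := by
            rw [PySem.Str.len_eq] at hlen ⊢; omega
          simp [this]
        · simp only [if_neg hlen]
          rw [ih 0 _ (le_refl _)]
          have hlen' : r.toNat ≤ text.toList.length := by
            rw [PySem.Str.len_eq] at hlen; omega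
          rw [List.take_append]
          have : r.toNat - text.toList.length = 0 := by omega
          rw [this, List.take_zero, List.append_nil]
          have hsl : (PySem.Str.slice text none (some r)).toList = text.toList.take r.toNat := by
            rw [PySem.Str.toList_slice, PySem.Chars.slice_eq_listSlice,
              PySem.List.slice_to _ (by omega : (0:Int) ≤ r)]
          simp [hsl]

-- ===== VERDICT (by name: the statement is the Claim_ definition above) =====
theorem truncate_sections_spec : Claim_equal_truncate_sections := by
  intro sections priority budget_chars _
  unfold Spec_truncate_sections truncate_sections truncate_sections_alt
  by_cases hb : budget_chars ≤ 0
  · simp [hb]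
  · simp only [if_neg hb]
    apply String.toList_inj.mp
    rw [str_join_nil_toList, truncate_loop_invariant sections priority budget_chars [] (by omega)]
    rw [PySem.Str.toList_slice, PySem.Chars.slice_eq_listSlice,
      PySem.List.slice_to _ (by omega : (0:Int) ≤ budget_chars), str_join_nil_toList]
    simp
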